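-- pv_equiv track=rewrite | github.com/AddrProbe/AddrProbe | code/sat_aliased_prefix.py | get_shortest_prefix
-- ===== SOURCE A (Python) =====
-- def get_shortest_prefix(ipv6_prefix):
--    ipv6_prefix = set(ipv6_prefix)
--    ipv6_prefix = sorted(ipv6_prefix)
--    shortest_prefixes = []
--    for address in ipv6_prefix:
--       flag = True
--       for i in shortest_prefixes:
--          if address.startswith(i):
--                flag = False
--       if flag:
--          shortest_prefixes.append(address)
--    return shortest_prefixes
-- ===== SOURCE B (Python) =====
-- def get_shortest_prefix(ipv6_prefix):
--     shortest_prefixes = []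
--     last = None
--     for address in sorted(set(ipv6_prefix)):
--         if last is None or not address.startswith(last):
--             shortest_prefixes.append(address)
--             last = address
--     return shortest_prefixes
-- ===== Notes on version B (the rewrite author's own statement) =====
-- stated objective: alternative
-- what changed: Replaces A's inner scan over all kept prefixes with a single comparison against the most recently kept prefix (valid because the deduplicated input is sorted, so any kept prefix of the current address must equal the last kept one); worst-case O(n*L) vs O(n^2*L) after the sort, though a timing run's inputs keep A's kept list small so no speed-up was measured.
import Mathlib
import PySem

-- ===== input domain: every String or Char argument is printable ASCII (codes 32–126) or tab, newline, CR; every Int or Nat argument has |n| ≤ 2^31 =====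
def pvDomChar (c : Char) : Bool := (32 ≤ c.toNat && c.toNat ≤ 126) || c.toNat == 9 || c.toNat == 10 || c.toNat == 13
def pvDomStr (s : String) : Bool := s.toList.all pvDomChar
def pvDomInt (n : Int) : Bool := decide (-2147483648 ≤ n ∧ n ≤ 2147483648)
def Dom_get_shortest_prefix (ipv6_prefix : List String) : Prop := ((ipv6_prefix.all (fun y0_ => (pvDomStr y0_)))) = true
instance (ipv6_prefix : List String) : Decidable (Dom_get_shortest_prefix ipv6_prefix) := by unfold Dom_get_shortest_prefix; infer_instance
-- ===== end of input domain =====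

-- B compares each address only against the most recently kept prefix instead of scanning all
-- kept prefixes (valid after the sort); return value proved equal on all inputs.

-- ===== PORT A =====
def get_shortest_prefix (ipv6_prefix : List String) : List String :=
  -- ipv6_prefix = set(ipv6_prefix); ipv6_prefix = sorted(ipv6_prefix)
  let xs := PySem.List.sorted (PySem.Set.ofList ipv6_prefix) (fun x => x) false
  -- for address in ipv6_prefix: flag = True; for i in shortest_prefixes: …
  xs.foldl (fun shortest_prefixes address =>
    let flag := shortest_prefixes.foldl
      (fun flag i => if PySem.Str.startswith address i then false else flag) true
    if flag then shortest_prefixes ++ [address] else shortest_prefixes) []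

-- ===== PORT B =====
def get_shortest_prefix_alt (ipv6_prefix : List String) : List String :=
  let xs := PySem.List.sorted (PySem.Set.ofList ipv6_prefix) (fun x => x) false
  -- state: (shortest_prefixes, last); compare only against the most recently kept prefix
  (xs.foldl (fun (acc : List String × Option String) address =>
    match acc.2 with
    | none => (acc.1 ++ [address], some address)
    | some last =>
        if PySem.Str.startswith address last then acc
        else (acc.1 ++ [address], some address)) ([], none)).1

-- ===== PRECONDITION & SPEC =====
def Spec_get_shortest_prefix (ipv6_prefix : List String) (out : List String) : Prop := out = get_shortest_prefix_alt ipv6_prefix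
instance (ipv6_prefix : List String) (out : List String) : Decidable (Spec_get_shortest_prefix ipv6_prefix out) := by unfold Spec_get_shortest_prefix; infer_instance

-- ===== CLAIM (what is proved, stated in full; the proofs are below) =====
def Claim_equal_get_shortest_prefix : Prop := ∀ (ipv6_prefix : List String), Dom_get_shortest_prefix ipv6_prefix → Spec_get_shortest_prefix ipv6_prefix (get_shortest_prefix ipv6_prefix)

-- ===== LEMMAS AND PROOFS =====

-- A's inner loop computes "no kept prefix starts address"
lemma gsp_flag_eq (a : String) (l : List String) (b : Bool) :
    l.foldl (fun flag i => if PySem.Str.startswith a i then false else flag) b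
      = (b && !(l.any (fun i => PySem.Str.startswith a i))) := by
  induction l generalizing b with
  | nil => simp
  | cons i l ih =>
      simp only [List.foldl_cons, List.any_cons, ih]
      cases h : PySem.Str.startswith a i <;> simp

-- a prefix is lexicographically ≤ its extension
lemma gsp_prefix_le {p q : List Char} (h : p <+: q) : p ≤ q := by
  rcases h with ⟨r, rfl⟩
  induction p with
  | nil => exact le_of_not_gt (fun h => by cases h)
  | cons c p ih => exact List.cons_le_cons c ih

lemma gsp_lex_sandwich {p q : List Char} (h : List.Lex (· < ·) p q) :
    ∀ r, ¬ p <+: q → List.Lex (· < ·) (p ++ r) q := by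
  induction h with
  | nil => intro r hnp; exact absurd (List.nil_prefix) hnp
  | @cons c l₁ l₂ h ih =>
      intro r hnp
      exact List.Lex.cons (ih r (fun hp => hnp (List.cons_prefix_cons.mpr ⟨rfl, hp⟩)))
  | rel hcd => exact fun r _ => List.Lex.rel hcd

-- p ≤ q ≤ a and p a prefix of a imply p a prefix of q
lemma gsp_sandwich {p q a : String} (hpa : p.toList <+: a.toList)
    (hpq : p ≤ q) (hqa : q ≤ a) : p.toList <+: q.toList := by
  by_contra hnp
  rcases lt_or_eq_of_le hpq with hlt | rfl
  · have hlex : List.Lex (· < ·) p.toList q.toList := String.lt_iff_toList_lt.mp hlt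
    rcases hpa with ⟨r, hr⟩
    have : List.Lex (· < ·) a.toList q.toList := by
      rw [← hr]; exact gsp_lex_sandwich hlex r hnp
    exact absurd (String.lt_iff_toList_lt.mpr this) (not_lt.mpr hqa)
  · exact hnp (List.prefix_refl _)

-- main invariant: A's fold over the sorted deduplicated tail equals B's fold
lemma gsp_main : ∀ (xs shortest : List String) (last : Option String),
    (∀ x ∈ xs, ∀ s ∈ shortest, s < x) →
    xs.Pairwise (· < ·) →
    (∀ i ∈ shortest, ∀ s ∈ shortest, i ≠ s → ¬ i.toList <+: s.toList) →
    ((last = none ∧ shortest = []) ∨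
      (∃ lst, last = some lst ∧ lst ∈ shortest ∧ ∀ s ∈ shortest, s ≤ lst)) →
    xs.foldl (fun shortest_prefixes address =>
      let flag := shortest_prefixes.foldl
        (fun flag i => if PySem.Str.startswith address i then false else flag) true
      if flag then shortest_prefixes ++ [address] else shortest_prefixes) shortest
    = (xs.foldl (fun (acc : List String × Option String) address =>
        match acc.2 with
        | none => (acc.1 ++ [address], some address)
        | some last =>
            if PySem.Str.startswith address last then acc
            else (acc.1 ++ [address], some address)) (shortest, last)).1 := by
  intro xs
  induction xs with
  | nil => intros; rfl
  | cons x xs ih =>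
      intro shortest last hle hsorted hpf hlast
      rw [List.pairwise_cons] at hsorted
      simp only [List.foldl_cons]
      rw [gsp_flag_eq]
      rcases hlast with ⟨hln, rfl⟩ | ⟨lst, rfl, hmem, hmax⟩
      · -- shortest = [], last = none: both append x
        subst hln
        simp only [List.any_nil, Bool.not_false, Bool.and_true, if_true, List.nil_append]
        refine ih [x] (some x) ?_ hsorted.2 ?_ (Or.inr ⟨x, rfl, by simp, by simp⟩)
        · intro y hy s hs
          rw [List.mem_singleton] at hs; subst hs
          exact hsorted.1 y hy
        · intro i hi s hs hne
          rw [List.mem_singleton] at hi hs; subst hi; subst hs; exact absurd rfl hne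
      · by_cases hsw : PySem.Str.startswith x lst = true
        · -- last kept prefix starts x: both skip
          have hany : shortest.any (fun i => PySem.Str.startswith x i) = true :=
            List.any_eq_true.mpr ⟨lst, hmem, hsw⟩
          simp only [hany, Bool.not_true, Bool.and_false, hsw, if_true]
          exact ih shortest (some lst)
            (fun y hy s hs => hle y (List.mem_cons_of_mem _ hy) s hs)
            hsorted.2 hpf (Or.inr ⟨lst, rfl, hmem, hmax⟩)
        · -- no kept prefix starts x: both append x
          have hany : shortest.any (fun i => PySem.Str.startswith x i) = false := by
            rw [Bool.eq_false_iff]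
            intro hany
            rcases List.any_eq_true.mp hany with ⟨i, hi, hswi⟩
            have hpre : i.toList <+: x.toList := by
              have := PySem.Str.startswith_eq x i
              rw [this] at hswi
              exact (PySem.Chars.startswith_iff _ _).mp hswi
            have hilst : i.toList <+: lst.toList :=
              gsp_sandwich hpre (hmax i hi) (le_of_lt (hle x (List.mem_cons_self) lst hmem))
            by_cases hil : i = lst
            · subst hil
              have : PySem.Str.startswith x i = true := by
                rw [PySem.Str.startswith_eq]
                exact (PySem.Chars.startswith_iff _ _).mpr hpre
              exact hsw this
            · exact hpf i hi lst hmem hil hilst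
          rw [Bool.not_eq_true] at hsw
          simp only [hany, Bool.not_false, Bool.and_true, if_true, hsw]
          have hxlt : ∀ s ∈ shortest, s < x := fun s hs => hle x List.mem_cons_self s hs
          refine ih (shortest ++ [x]) (some x) ?_ hsorted.2 ?_
            (Or.inr ⟨x, rfl, by simp, ?_⟩)
          · intro y hy s hs
            rcases List.mem_append.mp hs with hs | hs
            · exact hle y (List.mem_cons_of_mem _ hy) s hs
            · rw [List.mem_singleton] at hs; subst hs; exact hsorted.1 y hy
          · intro i hi s hs hne
            rcases List.mem_append.mp hi with hi | hi <;>
              rcases List.mem_append.mp hs with hs | hs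
            · exact hpf i hi s hs hne
            · -- i ∈ shortest, s = x: flag said no kept prefix starts x
              rw [List.mem_singleton] at hs; rw [hs]
              intro hpre
              have : PySem.Str.startswith x i = true := by
                rw [PySem.Str.startswith_eq]
                exact (PySem.Chars.startswith_iff _ _).mpr hpre
              have := List.any_eq_true.mpr ⟨i, hi, this⟩
              rw [hany] at this; exact Bool.false_ne_true this
            · -- i = x, s ∈ shortest: x <+: s contradicts s < x
              rw [List.mem_singleton] at hi; rw [hi]
              intro hpre
              exact absurd (String.lt_iff_toList_lt.mp (hxlt s hs))
                (not_lt.mpr (gsp_prefix_le hpre))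
            · rw [List.mem_singleton] at hi hs
              exact absurd (hi.trans hs.symm) hne
          · intro s hs
            rcases List.mem_append.mp hs with hs | hs
            · exact le_of_lt (hxlt s hs)
            · rw [List.mem_singleton] at hs; rw [hs]

-- ===== VERDICT (by name: the statement is the Claim_ definition above) =====
theorem get_shortest_prefix_spec : Claim_equal_get_shortest_prefix := by
  intro l _
  unfold Spec_get_shortest_prefix get_shortest_prefix get_shortest_prefix_alt
  exact gsp_main _ [] none (by simp)
    (by
      have := PySem.List.sorted_ofList_pairwise_lt (xs := l)
      exact this)
    (by simp) (Or.inl ⟨rfl, rfl⟩)
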